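-- pv_equiv track=rewrite | github.com/murshidmurshi/Python-Projects | PYTHON_project2/Happy number.py | happy_number
-- ===== SOURCE A (Python) =====
-- def get_digit(number):
--     digit = [ ]
--     while number:
--         digit.append(number %10)
--         number //=10
--
--     return digit
--
-- def is_happy_number(number):
--     previous_number=[]
--     while True:
--         digit=get_digit(number)
--         square_digit=sum(list(map(lambda x:x**2,digit)))
--         if square_digit==1:
--             return True
--         elif square_digit in previous_number:
--             return False
--         else:
--             number=square_digit
--             previous_number.append(number)
--
-- def happy_number(number):
--     happy_number=[]
--     count=0
--     while count<8:
--         if is_happy_number(number):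
--             happy_number.append(number)
--             count+=1
--         number+=1
--     return happy_number
-- ===== SOURCE B (Python) =====
-- # B: is_happy_number detects unhappiness by reaching the known absorbing cycle
-- # {0, 4->16->37->58->89->145->42->20} instead of keeping a growing history list.
-- _CYCLE = (1, 0, 4, 16, 20, 37, 42, 58, 89, 145)
--
-- def _step(number):
--     total = 0
--     while number:
--         number, d = divmod(number, 10)
--         total += d * d
--     return total
--
-- def is_happy_number(number):
--     while number not in _CYCLE:
--         number = _step(number)
--     return number == 1
--
-- def happy_number(number):
--     result = []
--     while len(result) < 8:
--         if is_happy_number(number):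
--             result.append(number)
--         number += 1
--     return result
-- ===== Notes on version B (the rewrite author's own statement) =====
-- stated objective: alternative
-- what changed: is_happy_number drops A's growing history list (append + linear membership scan per iteration) and instead iterates the digit-square map until it hits the known absorbing set {1, 0, 4, 16, 20, 37, 42, 58, 89, 145}, deciding by which element is reached; the digit-square sum is computed with divmod in one loop instead of building a digit list first.
import Mathlib
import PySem

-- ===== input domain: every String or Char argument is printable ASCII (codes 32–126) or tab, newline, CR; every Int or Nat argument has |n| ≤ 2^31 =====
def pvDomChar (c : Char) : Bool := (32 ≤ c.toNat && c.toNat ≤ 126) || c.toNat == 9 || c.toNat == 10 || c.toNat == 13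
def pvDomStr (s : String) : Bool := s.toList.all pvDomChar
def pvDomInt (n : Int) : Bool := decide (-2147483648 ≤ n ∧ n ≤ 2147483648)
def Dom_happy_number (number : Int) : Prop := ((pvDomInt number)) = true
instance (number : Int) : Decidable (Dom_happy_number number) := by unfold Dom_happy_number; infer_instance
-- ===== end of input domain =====

-- B replaces A's growing-history loop in is_happy_number by the constant absorbing-cycle
-- check (alternative algorithm); the fuel parameters only make the Python while-loops total.

-- ===== PORT A =====
def get_digit_aux (fuel : Nat) (number : Int) (digit : List Int) : List Int :=
  match fuel with
  | 0 => digit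
  | f + 1 =>
    if number ≠ 0 then
      get_digit_aux f (PySem.Int.floordiv number 10) (digit ++ [PySem.Int.mod number 10])
    else digit

def get_digit (number : Int) : List Int := get_digit_aux 100 number []

def is_happy_aux (fuel : Nat) (number : Int) (previous_number : List Int) : Bool :=
  match fuel with
  | 0 => false
  | f + 1 =>
    let square_digit := ((get_digit number).map (fun x => x ^ 2)).sum
    if square_digit = 1 then true
    else if previous_number.contains square_digit then false
    else is_happy_aux f square_digit (previous_number ++ [square_digit])

def is_happy_number (number : Int) : Bool := is_happy_aux 1000 number []

def happy_aux (fuel : Nat) (number : Int) (acc : List Int) (count : Int) : List Int :=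
  match fuel with
  | 0 => acc
  | f + 1 =>
    if count < 8 then
      if is_happy_number number then happy_aux f (number + 1) (acc ++ [number]) (count + 1)
      else happy_aux f (number + 1) acc count
    else acc

def happy_number (number : Int) : List Int := happy_aux 100000 number [] 0

-- ===== PORT B =====
def step_aux (fuel : Nat) (number : Int) (total : Int) : Int :=
  match fuel with
  | 0 => total
  | f + 1 =>
    if number ≠ 0 then
      step_aux f (PySem.Int.floordiv number 10)
        (total + PySem.Int.mod number 10 * PySem.Int.mod number 10)
    else total

def step_alt (number : Int) : Int := step_aux 100 number 0

def pvCycle : List Int := [1, 0, 4, 16, 20, 37, 42, 58, 89, 145]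

def is_happy_alt_aux (fuel : Nat) (number : Int) : Bool :=
  match fuel with
  | 0 => false
  | f + 1 =>
    if pvCycle.contains number then number == 1
    else is_happy_alt_aux f (step_alt number)

def is_happy_alt (number : Int) : Bool := is_happy_alt_aux 1000 number

def happy_alt_aux (fuel : Nat) (number : Int) (result : List Int) : List Int :=
  match fuel with
  | 0 => result
  | f + 1 =>
    if result.length < 8 then
      happy_alt_aux f (number + 1) (if is_happy_alt number then result ++ [number] else result)
    else result

def happy_number_alt (number : Int) : List Int := happy_alt_aux 100000 number []

-- ===== PRECONDITION & SPEC =====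
-- Pre_ excludes negative inputs: A's get_digit loops forever on any negative number
-- (number //= 10 sticks at -1), so A never returns there.
def Pre_happy_number (number : Int) : Prop := 0 ≤ number
instance (number : Int) : Decidable (Pre_happy_number number) := by unfold Pre_happy_number; infer_instance
def pvWitness_happy_number : Int := 7

def Spec_happy_number (number : Int) (out : List Int) : Prop := out = happy_number_alt number
instance (number : Int) (out : List Int) : Decidable (Spec_happy_number number out) := by unfold Spec_happy_number; infer_instance

-- ===== CLAIM (what is proved, stated in full; the proofs are below) =====
def Claim_equal_happy_number : Prop := ∀ (number : Int), Dom_happy_number number → Pre_happy_number number → Spec_happy_number number (happy_number number)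

-- ===== LEMMAS AND PROOFS =====

-- A's square-of-digits sum equals B's step loop.
theorem sum_sq_get_digit_aux (fuel : Nat) : ∀ (n : Int) (digit : List Int),
    ((get_digit_aux fuel n digit).map (fun x => x ^ 2)).sum
      = step_aux fuel n ((digit.map (fun x => x ^ 2)).sum) := by
  induction fuel with
  | zero => intro n digit; simp [get_digit_aux, step_aux]
  | succ f ih =>
    intro n digit
    by_cases h : n = 0
    · simp [get_digit_aux, step_aux, h]
    · simp only [get_digit_aux, step_aux, h, ne_eq, not_false_iff, if_true]
      rw [ih]
      congr 1
      simp [List.sum_append]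
      ring

theorem sum_sq_eq_step (n : Int) :
    ((get_digit n).map (fun x => x ^ 2)).sum = step_alt n := by
  simpa using sum_sq_get_digit_aux 100 n []

theorem is_happy_aux_succ (f : Nat) (n : Int) (prev : List Int) :
    is_happy_aux (f + 1) n prev
      = (if ((get_digit n).map (fun x => x ^ 2)).sum = 1 then true
         else if prev.contains (((get_digit n).map (fun x => x ^ 2)).sum) then false
         else is_happy_aux f (((get_digit n).map (fun x => x ^ 2)).sum)
                (prev ++ [((get_digit n).map (fun x => x ^ 2)).sum])) := rfl

-- Nat mirrors of the two inner loops (proof-side only)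
def stepN (fuel : Nat) (n t : Nat) : Nat :=
  match fuel with
  | 0 => t
  | f + 1 => if n ≠ 0 then stepN f (n / 10) (t + n % 10 * (n % 10)) else t

def hAN (fuel : Nat) (n : Nat) (prev : List Nat) : Bool :=
  match fuel with
  | 0 => false
  | f + 1 =>
    let s := stepN 100 n 0
    if s = 1 then true else if prev.contains s then false else hAN f s (prev ++ [s])

def cycleN : List Nat := [1, 0, 4, 16, 20, 37, 42, 58, 89, 145]

def hBN (fuel : Nat) (n : Nat) : Bool :=
  match fuel with
  | 0 => false
  | f + 1 => if cycleN.contains n then n == 1 else hBN f (stepN 100 n 0)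

theorem hAN_succ (f : Nat) (n : Nat) (prev : List Nat) :
    hAN (f + 1) n prev
      = (if stepN 100 n 0 = 1 then true
         else if prev.contains (stepN 100 n 0) then false
         else hAN f (stepN 100 n 0) (prev ++ [stepN 100 n 0])) := rfl

theorem hBN_succ (f : Nat) (n : Nat) :
    hBN (f + 1) n = (if cycleN.contains n then n == 1 else hBN f (stepN 100 n 0)) := rfl

-- cast bridges between the Int ports and the Nat mirrors
theorem stepN_cast (fuel : Nat) : ∀ (n t : Nat),
    step_aux fuel ((n : Nat) : Int) ((t : Nat) : Int) = ((stepN fuel n t : Nat) : Int) := by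
  induction fuel with
  | zero => intro n t; simp [step_aux, stepN]
  | succ f ih =>
    intro n t
    by_cases h : n = 0
    · simp [step_aux, stepN, h]
    · have hn : ((n : Nat) : Int) ≠ 0 := by exact_mod_cast h
      have h10 : (10 : Int) = ((10 : Nat) : Int) := by norm_num
      simp only [step_aux, stepN, h, hn, ne_eq, not_false_iff, if_true]
      rw [h10, PySem.Int.floordiv_natCast, PySem.Int.mod_natCast]
      rw [show ((t : Nat) : Int) + ((n % 10 : Nat) : Int) * ((n % 10 : Nat) : Int)
            = (((t + n % 10 * (n % 10) : Nat)) : Int) by push_cast; ring]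
      exact ih (n / 10) (t + n % 10 * (n % 10))

theorem step_alt_cast (n : Nat) : step_alt ((n : Nat) : Int) = ((stepN 100 n 0 : Nat) : Int) := by
  have := stepN_cast 100 n 0
  simpa [step_alt] using this

theorem beq_cast (x y : Nat) : (((x : Nat) : Int) == ((y : Nat) : Int)) = (x == y) := by
  by_cases h : x = y <;> simp [h]

theorem contains_map_cast (prev : List Nat) (s : Nat) :
    (prev.map (fun x : Nat => (x : Int))).contains ((s : Nat) : Int) = prev.contains s := by
  induction prev with
  | nil => rfl
  | cons a l ih => simp only [List.map_cons, List.contains_cons, ih, beq_cast]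

theorem hAN_cast (fuel : Nat) : ∀ (n : Nat) (prev : List Nat),
    is_happy_aux fuel ((n : Nat) : Int) (prev.map (fun x : Nat => (x : Int))) = hAN fuel n prev := by
  induction fuel with
  | zero => intro n prev; rfl
  | succ f ih =>
    intro n prev
    have hsq : ((get_digit ((n : Nat) : Int)).map (fun x => x ^ 2)).sum
        = ((stepN 100 n 0 : Nat) : Int) := by
      rw [sum_sq_eq_step, step_alt_cast]
    rw [is_happy_aux_succ, hAN_succ, hsq,
      show (prev.map (fun x : Nat => (x : Int))) ++ [((stepN 100 n 0 : Nat) : Int)]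
          = (prev ++ [stepN 100 n 0]).map (fun x : Nat => (x : Int)) by simp,
      contains_map_cast, ih]
    simp only [Nat.cast_eq_one]

theorem cycle_contains_cast (n : Nat) :
    pvCycle.contains ((n : Nat) : Int) = cycleN.contains n := by
  by_cases h : cycleN.contains n
  · have hm : n ∈ cycleN := by simpa using h
    fin_cases hm <;> decide
  · have hm : n ∉ cycleN := by simpa using h
    have h2 : ((n : Nat) : Int) ∉ pvCycle := by
      simp only [pvCycle, List.mem_cons, List.not_mem_nil, or_false] at *
      simp only [cycleN, List.mem_cons, List.not_mem_nil, or_false] at hm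
      push_neg at hm ⊢
      omega
    simp only [List.contains_eq_mem]
    exact decide_eq_decide.mpr (iff_of_false h2 hm)

theorem hBN_cast (fuel : Nat) : ∀ (n : Nat),
    is_happy_alt_aux fuel ((n : Nat) : Int) = hBN fuel n := by
  induction fuel with
  | zero => intro n; rfl
  | succ f ih =>
    intro n
    show (if pvCycle.contains ((n : Nat) : Int) then ((n : Nat) : Int) == 1
          else is_happy_alt_aux f (step_alt ((n : Nat) : Int))) = _
    rw [hBN_succ, cycle_contains_cast]
    by_cases hc : cycleN.contains n
    · simp only [hc, if_true]
      rw [show (1 : Int) = ((1 : Nat) : Int) by norm_num, beq_cast]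
    · simp only [hc, Bool.false_eq_true, if_neg, not_false_iff]
      rw [step_alt_cast]
      exact ih (stepN 100 n 0)

-- digit-square bound: a number below 10^k has digit-square sum at most 81*k
theorem stepN_le (k : Nat) : ∀ (fuel n t : Nat), k ≤ fuel → n < 10 ^ k →
    stepN fuel n t ≤ t + 81 * k := by
  induction k with
  | zero =>
    intro fuel n t _ hlt
    have hn0 : n = 0 := by omega
    cases fuel with
    | zero => simp [stepN]
    | succ f => simp [stepN, hn0]
  | succ k ih =>
    intro fuel n t hkf hlt
    cases fuel with
    | zero => omega
    | succ f =>
      by_cases h : n = 0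
      · have he : stepN (f + 1) n t = t := by simp [stepN, h]
        rw [he]; omega
      · simp only [stepN, h, ne_eq, not_false_iff, if_true]
        have hdiv : n / 10 < 10 ^ k := by
          have : n < 10 * 10 ^ k := by rw [pow_succ] at hlt; omega
          omega
        have := ih f (n / 10) (t + n % 10 * (n % 10)) (by omega) hdiv
        have h9 : n % 10 ≤ 9 := by omega
        have : n % 10 * (n % 10) ≤ 81 := le_trans (Nat.mul_le_mul h9 h9) (by norm_num)
        omega

-- the finite checks, in chunks small enough for `decide`
theorem pvChk999_0 : (List.range' 0 61).all
    (fun v => (if v = 1 then true else hAN 999 v [v]) == hBN 999 v) = true := by decide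

theorem pvChk999_61 : (List.range' 61 61).all
    (fun v => (if v = 1 then true else hAN 999 v [v]) == hBN 999 v) = true := by decide

theorem pvChk999_122 : (List.range' 122 61).all
    (fun v => (if v = 1 then true else hAN 999 v [v]) == hBN 999 v) = true := by decide

theorem pvChk999_183 : (List.range' 183 61).all
    (fun v => (if v = 1 then true else hAN 999 v [v]) == hBN 999 v) = true := by decide

theorem pvChk998_0 : (List.range' 0 61).all
    (fun v => (if v = 1 then true else hAN 998 v [v]) == hBN 998 v) = true := by decide

theorem pvChk998_61 : (List.range' 61 61).all
    (fun v => (if v = 1 then true else hAN 998 v [v]) == hBN 998 v) = true := by decide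

theorem pvChk998_122 : (List.range' 122 61).all
    (fun v => (if v = 1 then true else hAN 998 v [v]) == hBN 998 v) = true := by decide

theorem pvChk998_183 : (List.range' 183 61).all
    (fun v => (if v = 1 then true else hAN 998 v [v]) == hBN 998 v) = true := by decide

theorem pvChunk_ext {f : Nat → Bool} {lo len : Nat}
    (h : (List.range' lo len).all f = true) :
    ∀ s : Nat, lo ≤ s → s < lo + len → f s = true := by
  intro s h1 h2
  exact List.all_eq_true.mp h s (by rw [List.mem_range'_1]; omega)

theorem pvChk999 : ∀ v : Nat, v < 244 →
    ((if v = 1 then true else hAN 999 v [v]) == hBN 999 v) = true := by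
  intro v hv
  by_cases h0 : v < 61
  · exact pvChunk_ext pvChk999_0 v (by omega) (by omega)
  by_cases h61 : v < 122
  · exact pvChunk_ext pvChk999_61 v (by omega) (by omega)
  by_cases h122 : v < 183
  · exact pvChunk_ext pvChk999_122 v (by omega) (by omega)
  by_cases h183 : v < 244
  · exact pvChunk_ext pvChk999_183 v (by omega) (by omega)
  omega

theorem pvChk998 : ∀ v : Nat, v < 244 →
    ((if v = 1 then true else hAN 998 v [v]) == hBN 998 v) = true := by
  intro v hv
  by_cases h0 : v < 61
  · exact pvChunk_ext pvChk998_0 v (by omega) (by omega)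
  by_cases h61 : v < 122
  · exact pvChunk_ext pvChk998_61 v (by omega) (by omega)
  by_cases h122 : v < 183
  · exact pvChunk_ext pvChk998_122 v (by omega) (by omega)
  by_cases h183 : v < 244
  · exact pvChunk_ext pvChk998_183 v (by omega) (by omega)
  omega

theorem pvC999 (v : Nat) (hv : v < 244) :
    (if v = 1 then true else hAN 999 v [v]) = hBN 999 v :=
  eq_of_beq (pvChk999 v hv)

theorem pvC998 (v : Nat) (hv : v < 244) :
    (if v = 1 then true else hAN 998 v [v]) = hBN 998 v :=
  eq_of_beq (pvChk998 v hv)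

theorem pvCycCase : ∀ m ∈ cycleN, hAN 1000 m [] = hBN 1000 m := by decide

-- a history entry larger than every future digit-square sum never matters
theorem hAN_drop_junk (f : Nat) : ∀ (n x : Nat) (prev : List Nat), n ≤ 243 → 243 < x →
    hAN f n (x :: prev) = hAN f n prev := by
  induction f with
  | zero => intro n x prev _ _; rfl
  | succ f ih =>
    intro n x prev hn hx
    have hs : stepN 100 n 0 ≤ 243 := by
      have := stepN_le 3 100 n 0 (by norm_num) (by norm_num; omega)
      omega
    rw [hAN_succ, hAN_succ]
    have hne : (stepN 100 n 0 == x) = false := by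
      simp only [beq_eq_false_iff_ne, ne_eq]; omega
    simp only [List.contains_cons, hne, Bool.false_or]
    by_cases h1 : stepN 100 n 0 = 1
    · simp [h1]
    · by_cases hm : stepN 100 n 0 ∈ prev
      · simp [h1, hm]
      · have hm' : prev.contains (stepN 100 n 0) = false := by
          simp only [List.contains_eq_mem]; exact decide_eq_false hm
        simp only [h1, hm', Bool.false_eq_true, if_neg, not_false_iff]
        rw [show x :: prev ++ [stepN 100 n 0] = x :: (prev ++ [stepN 100 n 0]) by simp]
        exact ih (stepN 100 n 0) x (prev ++ [stepN 100 n 0]) hs hx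

theorem cycleN_contains_false {s : Nat} (h : 243 < s) : cycleN.contains s = false := by
  simp only [List.contains_eq_mem, decide_eq_false_iff_not, cycleN, List.mem_cons,
    List.not_mem_nil, or_false]
  omega

theorem mirror_eq (m : Nat) (hm : m < 100000000000) : hAN 1000 m [] = hBN 1000 m := by
  by_cases hc : m ∈ cycleN
  · exact pvCycCase m hc
  · have hcf : cycleN.contains m = false := by
      simp only [List.contains_eq_mem, decide_eq_false_iff_not]; exact hc
    have hs : stepN 100 m 0 ≤ 891 := by
      have := stepN_le 11 100 m 0 (by norm_num) (by norm_num; omega)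
      omega
    show hAN (999 + 1) m [] = hBN (999 + 1) m
    rw [hAN_succ, hBN_succ, hcf]
    simp only [List.contains_nil, Bool.false_eq_true, if_neg, not_false_iff,
      List.nil_append]
    set s := stepN 100 m 0 with hsdef
    by_cases hs243 : s ≤ 243
    · exact pvC999 s (by omega)
    · -- s > 243: s is not 1 and not in the cycle; unfold one more iteration
      have hs2 : stepN 100 s 0 ≤ 243 := by
        have := stepN_le 3 100 s 0 (by norm_num) (by norm_num; omega)
        omega
      rw [if_neg (by omega)]
      show hAN (998 + 1) s [s] = hBN (998 + 1) s
      rw [hAN_succ, hBN_succ, cycleN_contains_false (by omega)]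
      set s2 := stepN 100 s 0 with hs2def
      have hcontains : ([s] : List Nat).contains s2 = false := by
        simp only [List.contains_cons, List.contains_nil, Bool.or_false,
          beq_eq_false_iff_ne, ne_eq]
        omega
      simp only [Bool.false_eq_true, if_neg, not_false_iff, hcontains]
      by_cases h1 : s2 = 1
      · rw [if_pos h1]
        have := pvC998 s2 (by omega)
        rw [if_pos h1] at this
        exact this
      · rw [if_neg h1]
        rw [show [s] ++ [s2] = s :: [s2] by simp]
        rw [hAN_drop_junk 998 s2 s [s2] (by omega) (by omega)]
        have := pvC998 s2 (by omega)
        rw [if_neg h1] at this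
        exact this

-- the two inner implementations agree on every admitted number
theorem is_happy_eq (n : Int) (hn : 0 ≤ n) (hlt : n < 100000000000) :
    is_happy_number n = is_happy_alt n := by
  have h1 : n = ((n.toNat : Nat) : Int) := by omega
  rw [h1]
  show is_happy_aux 1000 ((n.toNat : Nat) : Int) (([] : List Nat).map (fun x : Nat => (x : Int)))
      = is_happy_alt_aux 1000 ((n.toNat : Nat) : Int)
  rw [hAN_cast, hBN_cast]
  exact mirror_eq n.toNat (by omega)

-- the outer collecting loops agree
theorem happy_aux_eq (fuel : Nat) : ∀ (n : Int) (acc : List Int),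
    0 ≤ n → n + fuel ≤ 100000000000 →
    happy_aux fuel n acc (acc.length : Int) = happy_alt_aux fuel n acc := by
  induction fuel with
  | zero => intro n acc _ _; simp [happy_aux, happy_alt_aux]
  | succ f ih =>
    intro n acc hn hb
    by_cases hc : (acc.length : Int) < 8
    · have hlen : acc.length < 8 := by exact_mod_cast hc
      have hih := fun acc' => ih (n + 1) acc' (by omega) (by push_cast at hb ⊢; omega)
      have hhap := is_happy_eq n hn (by push_cast at hb; omega)
      by_cases hh : is_happy_alt n = true
      · have hA : is_happy_number n = true := by rw [hhap, hh]
        simp only [happy_aux, happy_alt_aux, hc, if_pos, hlen, hA, hh]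
        have := hih (acc ++ [n])
        simpa using this
      · have hh' : is_happy_alt n = false := by simpa using hh
        have hA : is_happy_number n = false := by rw [hhap, hh']
        simp only [happy_aux, happy_alt_aux, hc, if_pos, hlen, hA, hh', Bool.false_eq_true,
          if_neg, not_false_iff, if_true]
        exact hih acc
    · have hlen : ¬ acc.length < 8 := by omega
      simp [happy_aux, happy_alt_aux, hc, hlen]

-- ===== VERDICT (by name: the statement is the Claim_ definition above) =====
theorem happy_number_spec : Claim_equal_happy_number := by
  intro number hdom hpre
  unfold Spec_happy_number happy_number happy_number_alt
  have hd : -2147483648 ≤ number ∧ number ≤ 2147483648 := by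
    have := hdom; unfold Dom_happy_number pvDomInt at this; exact of_decide_eq_true this
  have := happy_aux_eq 100000 number [] hpre (by push_cast; omega)
  simpa using this
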